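-- pv_equiv track=rewrite | github.com/Komdix/bekap_wins | bakap_nadruhu/kodikovanie/old/1st_block/04/p6_divisors.py | common_divisors
-- ===== SOURCE A (Python) =====
-- def common_divisors(rows: int, cols: int) -> list[list[int]]:
--     lst = []
--
--     for row in range(1, rows+1):
--         lst_row = [1]
--
--         for divisor_row in range(2, row + 1):
--             if row % divisor_row == 0:
--                 div_row = divisor_row
--                 lst_row.append(div_row)
--
--         lst_col: list[int] = []
--         control = 0
--
--         for col in range(1, cols + 1):
--             count = 0
--
--             if control == cols+1:
--                 lst_col = []
--                 control = 0
--
--             for divisor_col in range(1, col + 1):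
--                 if col % divisor_col == 0:
--                     for element in lst_row:
--                         if element == divisor_col:
--
--                             count += 1
--                 control += 1
--             lst_col.append(count)
--         lst.append(lst_col)
--
--     return lst
-- ===== SOURCE B (Python) =====
-- def _gcd(a, b):
--     while b:
--         a, b = b, a % b
--     return a
--
--
-- def common_divisors(rows: int, cols: int) -> list[list[int]]:
--     # number of common divisors of (row, col) = number of divisors of gcd(row, col);
--     # precompute the divisor-count table once instead of rescanning divisor lists.
--     n = min(rows, cols)
--     tau = [sum(1 for d in range(1, m + 1) if m % d == 0) for m in range(n + 1)]
--     return [[tau[_gcd(r, c)] for c in range(1, cols + 1)] for r in range(1, rows + 1)]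
-- ===== Notes on version B (the rewrite author's own statement) =====
-- stated objective: faster
-- what changed: B replaces the per-(row,col) rescans of divisor lists (and A's broken 'control' reset) by one precomputed divisor-count table indexed by gcd(row,col).
-- intended difference: For rows >= 1 and cols in {5, 9, 14, 20, 27, ...} (cols+1 triangular), A's stray 'control' counter resets lst_col mid-row so A returns truncated row lists (e.g. A(1,5)=[[1,1]]), while B returns the full cols-long lists of common-divisor counts ([[1,1,1,1,1]]), which is the intended value. — e.g. on common_divisors(1, 5): A returns [[1, 1]], B returns [[1, 1, 1, 1, 1]]
import Mathlib
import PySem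

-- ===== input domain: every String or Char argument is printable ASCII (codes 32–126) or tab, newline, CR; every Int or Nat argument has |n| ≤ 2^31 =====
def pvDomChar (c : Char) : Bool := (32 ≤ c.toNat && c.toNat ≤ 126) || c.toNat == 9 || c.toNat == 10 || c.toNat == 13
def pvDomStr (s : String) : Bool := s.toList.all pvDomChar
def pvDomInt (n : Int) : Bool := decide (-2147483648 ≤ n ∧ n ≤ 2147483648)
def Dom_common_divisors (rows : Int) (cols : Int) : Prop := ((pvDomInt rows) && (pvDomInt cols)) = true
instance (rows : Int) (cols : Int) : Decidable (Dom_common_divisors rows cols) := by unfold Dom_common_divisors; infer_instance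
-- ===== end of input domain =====

-- B replaces A's per-(row,col) divisor-list rescans (and A's buggy 'control' reset) by one
-- precomputed divisor-count table indexed by gcd(row,col) (objective: faster).

-- ===== PORT A =====
def common_divisors (rows : Int) (cols : Int) : List (List Int) :=
  (PySem.List.pyRange 1 (rows + 1) 1).foldl (fun lst row =>
    let lst_row := (PySem.List.pyRange 2 (row + 1) 1).foldl
      (fun acc d => if PySem.Int.mod row d == 0 then acc ++ [d] else acc) [1]
    let p := (PySem.List.pyRange 1 (cols + 1) 1).foldl
      (fun (st : List Int × Int) col =>
        let st := if st.2 == cols + 1 then (([] : List Int), (0 : Int)) else st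
        let q := (PySem.List.pyRange 1 (col + 1) 1).foldl
          (fun (cc : Int × Int) dc =>
            (if PySem.Int.mod col dc == 0
               then lst_row.foldl (fun c e => if e == dc then c + 1 else c) cc.1
               else cc.1,
             cc.2 + 1)) ((0 : Int), st.2)
        (st.1 ++ [q.1], q.2)) (([] : List Int), (0 : Int))
    lst ++ [p.1]) []

-- ===== PORT B =====
-- Euclid's loop from Source B: while b: a, b = b, a % b  (Python floor mod)
def pyGcd (a b : Int) : Int :=
  if _h : b = 0 then a else pyGcd b (PySem.Int.mod a b)
termination_by b.natAbs
decreasing_by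
  rcases lt_trichotomy b 0 with hb | hb | hb
  · have h1 : b < PySem.Int.mod a b ∧ PySem.Int.mod a b ≤ 0 := PySem.Int.mod_neg_bounds a hb
    omega
  · exact absurd hb _h
  · have h2 := PySem.Int.mod_nonneg a hb
    have h3 := PySem.Int.mod_lt a hb
    omega

def common_divisors_alt (rows : Int) (cols : Int) : List (List Int) :=
  let n := if rows ≤ cols then rows else cols  -- min(rows, cols)
  let tau := (PySem.List.pyRange 0 (n + 1) 1).map (fun m =>
    (PySem.List.pyRange 1 (m + 1) 1).foldl
      (fun s d => s + (if PySem.Int.mod m d == 0 then (1 : Int) else 0)) 0)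
  -- tau[_gcd(r, c)]: the index is always in range (0 ≤ gcd ≤ n), rendered with pyGetD default 0
  (PySem.List.pyRange 1 (rows + 1) 1).map (fun r =>
    (PySem.List.pyRange 1 (cols + 1) 1).map (fun c =>
      PySem.List.pyGetD tau (pyGcd r c) 0))

-- ===== PRECONDITION & SPEC =====
-- For rows ≥ 1 and cols with cols+1 triangular (cols ∈ {5, 9, 14, 20, …}) A's stray 'control'
-- counter resets lst_col mid-row, so A returns truncated row lists; B returns the full
-- cols-long lists of common-divisor counts, which is the intended value.
-- kernel-computable integer square root (fuel-structural; exact for n < 4^fuel)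
def pvIsqrt : Nat → Nat → Nat
  | 0, _ => 0
  | f + 1, n =>
    let r := pvIsqrt f (n / 4)
    if (2 * r + 1) * (2 * r + 1) ≤ n then 2 * r + 1 else 2 * r

def D_common_divisors (rows : Int) (cols : Int) : Prop :=
  1 ≤ rows ∧ 3 ≤ cols ∧
    pvIsqrt 17 (2 * (cols + 1)).toNat * (pvIsqrt 17 (2 * (cols + 1)).toNat + 1)
      = (2 * (cols + 1)).toNat
instance (rows : Int) (cols : Int) : Decidable (D_common_divisors rows cols) := by
  unfold D_common_divisors; infer_instance

def Spec_common_divisors (rows : Int) (cols : Int) (out : List (List Int)) : Prop :=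
  ¬ D_common_divisors rows cols → out = common_divisors_alt rows cols
instance (rows : Int) (cols : Int) (out : List (List Int)) : Decidable (Spec_common_divisors rows cols out) := by
  unfold Spec_common_divisors; infer_instance

def pvDiffWitness_common_divisors : Int × Int := (1, 5)
def pvDiffWitnessOut_common_divisors : (List (List Int)) × (List (List Int)) :=
  ([[1, 1]], [[1, 1, 1, 1, 1]])

-- ===== CLAIM (what is proved, stated in full; the proofs are below) =====
def Claim_unchanged_common_divisors : Prop := ∀ (rows : Int) (cols : Int), Dom_common_divisors rows cols → Spec_common_divisors rows cols (common_divisors rows cols)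
def Claim_changed_common_divisors : Prop := Dom_common_divisors (pvDiffWitness_common_divisors.1) (pvDiffWitness_common_divisors.2) ∧ D_common_divisors (pvDiffWitness_common_divisors.1) (pvDiffWitness_common_divisors.2) ∧ common_divisors (pvDiffWitness_common_divisors.1) (pvDiffWitness_common_divisors.2) = pvDiffWitnessOut_common_divisors.1 ∧ common_divisors_alt (pvDiffWitness_common_divisors.1) (pvDiffWitness_common_divisors.2) = pvDiffWitnessOut_common_divisors.2 ∧ pvDiffWitnessOut_common_divisors.1 ≠ pvDiffWitnessOut_common_divisors.2

def Claim_exact_common_divisors : Prop := ∀ (rows : Int) (cols : Int), Dom_common_divisors rows cols → D_common_divisors rows cols → common_divisors rows cols ≠ common_divisors_alt rows cols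

-- ===== LEMMAS AND PROOFS =====

-- D_ in solved (Nat.sqrt) form ↔ the reset condition of A's control counter
theorem pvIsqrt_spec : ∀ (f n : Nat), n < 4 ^ f →
    pvIsqrt f n * pvIsqrt f n ≤ n ∧ n < (pvIsqrt f n + 1) * (pvIsqrt f n + 1) := by
  intro f
  induction f with
  | zero => intro n hn; interval_cases n; simp [pvIsqrt]
  | succ f ih =>
    intro n hn
    have hdiv : n / 4 < 4 ^ f := by
      have : n < 4 * 4 ^ f := by rw [pow_succ] at hn; omega
      omega
    obtain ⟨ih1, ih2⟩ := ih (n / 4) hdiv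
    simp only [pvIsqrt]
    set r := pvIsqrt f (n / 4) with hr
    have e1 : (2 * r + 1) * (2 * r + 1) = 4 * (r * r) + 4 * r + 1 := by ring
    have e2 : (2 * r + 2) * (2 * r + 2) = 4 * ((r + 1) * (r + 1)) := by ring
    have e3 : (r + 1) * (r + 1) = r * r + 2 * r + 1 := by ring
    have e4 : 2 * r * (2 * r) = 4 * (r * r) := by ring
    have e5 : (2 * r + 1 + 1) * (2 * r + 1 + 1) = 4 * ((r + 1) * (r + 1)) := by ring
    have h4 : 4 * (n / 4) ≤ n := by omega
    have h5 : n < 4 * (n / 4) + 4 := by omega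
    split <;> constructor <;> omega

-- D_ in solved (pvIsqrt) form ↔ the reset condition of A's control counter (on the bounded domain)
theorem D_iff (rows cols : Int) (hcb : cols ≤ 2147483648) :
    D_common_divisors rows cols ↔
      (1 ≤ rows ∧ ∃ c : Int, 3 ≤ c ∧ c < cols + 1 ∧ c * (c + 1) = 2 * (cols + 1)) := by
  unfold D_common_divisors
  have hfuel : ∀ h3 : 3 ≤ cols, (2 * (cols + 1)).toNat < 4 ^ 17 := by
    intro h3; have : (2 * (cols + 1)).toNat ≤ 2 * 2147483649 := by omega
    calc (2 * (cols + 1)).toNat ≤ 2 * 2147483649 := this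
      _ < 4 ^ 17 := by norm_num
  constructor
  · rintro ⟨h1, h3, heq⟩
    set s := pvIsqrt 17 (2 * (cols + 1)).toNat with hs
    have hM : ((2 * (cols + 1)).toNat : Int) = 2 * (cols + 1) := Int.toNat_of_nonneg (by omega)
    have heqZ : (s : Int) * ((s : Int) + 1) = 2 * (cols + 1) := by
      rw [← hM]; exact_mod_cast heq
    have hs0 : (0 : Int) ≤ (s : Int) := by positivity
    have hs3 : 3 ≤ (s : Int) := by nlinarith
    refine ⟨h1, (s : Int), hs3, by nlinarith, heqZ⟩
  · rintro ⟨h1, c, hc3, hcc, heq⟩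
    have hcols : 3 ≤ cols := by nlinarith
    refine ⟨h1, hcols, ?_⟩
    have hM : ((2 * (cols + 1)).toNat : Int) = 2 * (cols + 1) := Int.toNat_of_nonneg (by omega)
    have hcn : ((c.toNat : Nat) : Int) = c := Int.toNat_of_nonneg (by omega)
    have heqN : c.toNat * (c.toNat + 1) = (2 * (cols + 1)).toNat := by
      have h := heq
      rw [← hM, ← hcn] at h
      exact_mod_cast h
    obtain ⟨hsp1, hsp2⟩ := pvIsqrt_spec 17 (2 * (cols + 1)).toNat (hfuel hcols)
    have hsq : pvIsqrt 17 (2 * (cols + 1)).toNat = c.toNat := by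
      set s := pvIsqrt 17 (2 * (cols + 1)).toNat with hs
      rw [← heqN] at hsp1 hsp2
      by_contra hne
      rcases Nat.lt_or_ge s c.toNat with hlt | hge
      · have : (s + 1) * (s + 1) ≤ c.toNat * c.toNat := Nat.mul_le_mul (by omega) (by omega)
        nlinarith
      · have hgt : c.toNat < s := by omega
        have : (c.toNat + 1) * (c.toNat + 1) ≤ s * s := Nat.mul_le_mul (by omega) (by omega)
        nlinarith
    rw [hsq]; exact heqN

-- pyGcd a b is a greatest common divisor of a and b (for nonnegative arguments)
theorem pyGcd_spec (a b : Int) (ha : 0 ≤ a) (hb : 0 ≤ b) :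
    0 ≤ pyGcd a b ∧ pyGcd a b ∣ a ∧ pyGcd a b ∣ b ∧
      ∀ d : Int, d ∣ a → d ∣ b → d ∣ pyGcd a b := by
  rw [pyGcd]
  split
  · next h => subst h; exact ⟨ha, dvd_refl a, dvd_zero a, fun d hd _ => hd⟩
  · next h =>
    have hb' : 0 < b := lt_of_le_of_ne hb (Ne.symm h)
    have hm0 : 0 ≤ PySem.Int.mod a b := PySem.Int.mod_nonneg a hb'
    obtain ⟨ih0, ih1, ih2, ih3⟩ := pyGcd_spec b (PySem.Int.mod a b) hb hm0
    have hdecomp : PySem.Int.floordiv a b * b + PySem.Int.mod a b = a :=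
      PySem.Int.floordiv_mul_add_mod a b
    refine ⟨ih0, ?_, ih1, ?_⟩
    · have : pyGcd b (PySem.Int.mod a b) ∣ PySem.Int.floordiv a b * b + PySem.Int.mod a b :=
        dvd_add (Dvd.dvd.mul_left ih1 _) ih2
      rwa [hdecomp] at this
    · intro d hda hdb
      refine ih3 d hdb ?_
      have hmd : PySem.Int.mod a b = a - PySem.Int.floordiv a b * b := by linarith
      rw [hmd]
      exact dvd_sub hda (Dvd.dvd.mul_left hdb _)
termination_by b.natAbs
decreasing_by
  have h1 := PySem.Int.mod_nonneg a hb'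
  have h2 := PySem.Int.mod_lt a hb'
  omega

-- A's lst_row: the ascending list of positive divisors of row
def pvDivList (row : Int) : List Int :=
  (PySem.List.pyRange 1 (row + 1) 1).filter (fun d => decide (d ∣ row))

theorem lstRow_eq (row : Int) (h : 1 ≤ row) :
    (PySem.List.pyRange 2 (row + 1) 1).foldl
      (fun acc d => if PySem.Int.mod row d == 0 then acc ++ [d] else acc) [1]
      = pvDivList row := by
  have h1 : (PySem.List.pyRange 2 (row + 1) 1).foldl
      (fun acc d => if PySem.Int.mod row d == 0 then acc ++ [d] else acc) [1]
      = [1] ++ ((PySem.List.pyRange 2 (row + 1) 1).filter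
          (fun d => PySem.Int.mod row d == 0)).map id :=
    PySem.List.foldl_append_if _ id _ _
  rw [h1, List.map_id]
  unfold pvDivList
  rw [PySem.List.pyRange_one_cons (by omega : (1:Int) < row + 1)]
  rw [List.filter_cons]
  simp only [decide_eq_true_eq, one_dvd, if_pos]
  have h2 : (PySem.List.pyRange (1 + 1) (row + 1) 1).filter (fun d => decide (d ∣ row))
      = (PySem.List.pyRange 2 (row + 1) 1).filter (fun d => PySem.Int.mod row d == 0) := by
    norm_num
    exact List.filter_congr (fun x _ => by
      rw [show ((PySem.Int.mod row x == 0) : Bool) = decide (x ∣ row) by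
        rw [Bool.eq_iff_iff]
        simp [PySem.Int.mod_eq_zero_iff_dvd]])
  rw [h2]
  rfl

theorem count_divList (row dc : Int) (h : 1 ≤ row) :
    (List.countP (fun e => e == dc) (pvDivList row) : Int)
      = if dc ∣ row ∧ 1 ≤ dc then 1 else 0 := by
  have hnd : (pvDivList row).Nodup := (PySem.List.nodup_pyRange_one 1 (row+1)).filter _
  have hcnt : List.countP (fun e => e == dc) (pvDivList row) = List.count dc (pvDivList row) := by
    simp [List.count]
  rw [hcnt]
  by_cases hm : dc ∈ pvDivList row
  · rw [List.count_eq_one_of_mem hnd hm]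
    have : dc ∣ row ∧ 1 ≤ dc := by
      have := hm
      unfold pvDivList at this
      simp [List.mem_filter, PySem.List.mem_pyRange_one] at this
      exact ⟨this.2, this.1.1⟩
    rw [if_pos this]; rfl
  · rw [List.count_eq_zero_of_not_mem hm]
    have : ¬ (dc ∣ row ∧ 1 ≤ dc) := by
      intro ⟨hd, h1⟩
      apply hm
      unfold pvDivList
      have hle : dc ≤ row := Int.le_of_dvd (by omega) hd
      simp [List.mem_filter, PySem.List.mem_pyRange_one]
      exact ⟨⟨h1, by omega⟩, hd⟩
    rw [if_neg this]; rfl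

-- B's tau entry
def pvTauVal (m : Int) : Int :=
  (PySem.List.pyRange 1 (m + 1) 1).foldl
    (fun s d => s + (if PySem.Int.mod m d == 0 then (1 : Int) else 0)) 0

-- A's per-column count, with the (count, control) pair split off
def pvColVal (row col : Int) : Int :=
  (PySem.List.pyRange 1 (col + 1) 1).foldl
    (fun c dc => if PySem.Int.mod col dc == 0
       then (pvDivList row).foldl (fun c e => if e == dc then c + 1 else c) c
       else c) 0

theorem foldl_pair_inner (l : List Int) (f : Int → Int → Int) (c0 t0 : Int) :
    l.foldl (fun (cc : Int × Int) dc => (f cc.1 dc, cc.2 + 1)) (c0, t0)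
      = (l.foldl f c0, t0 + l.length) := by
  induction l generalizing c0 t0 with
  | nil => simp
  | cons x t ih => simp [ih]; ring

theorem ite_acc_add (P : Prop) [Decidable P] (c k : Int) :
    (if P then c + k else c) = c + (if P then k else 0) := by split <;> simp

theorem colVal_eq_tau (row col : Int) (hr : 1 ≤ row) (hc : 1 ≤ col) :
    pvColVal row col = pvTauVal (pyGcd row col) := by
  obtain ⟨hg0, hgr, hgc, hgmax⟩ := pyGcd_spec row col (by omega) (by omega)
  set g := pyGcd row col with hgdef
  have hg1 : 1 ≤ g := by
    have hne : g ≠ 0 := by intro h0; rw [h0, Int.zero_dvd] at hgc; omega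
    omega
  have hgcol : g ≤ col := Int.le_of_dvd (by omega) hgc
  have hgrow : g ≤ row := Int.le_of_dvd (by omega) hgr
  unfold pvColVal pvTauVal
  have hfun : (fun (c : Int) dc => if PySem.Int.mod col dc == 0
        then (pvDivList row).foldl (fun c e => if e == dc then c + 1 else c) c
        else c)
      = fun c dc => c + (if PySem.Int.mod col dc == 0
          then ((List.countP (fun e => e == dc) (pvDivList row)) : Int) else 0) := by
    funext c dc
    rw [PySem.List.foldl_if_add_one]
    exact ite_acc_add _ _ _
  rw [hfun, PySem.List.foldl_add, PySem.List.foldl_add]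
  simp only [zero_add]
  have hmap : (PySem.List.pyRange 1 (col + 1) 1).map
      (fun dc => if PySem.Int.mod col dc == 0
        then ((List.countP (fun e => e == dc) (pvDivList row)) : Int) else 0)
      = (PySem.List.pyRange 1 (col + 1) 1).map
      (fun dc => if dc ∣ g then (1 : Int) else 0) := by
    apply List.map_congr_left
    intro dc hdc
    rw [PySem.List.mem_pyRange_one] at hdc
    rw [count_divList row dc hr]
    by_cases hdg : dc ∣ g
    · have hdcol : dc ∣ col := dvd_trans hdg hgc
      have hdrow : dc ∣ row := dvd_trans hdg hgr
      rw [if_pos hdg]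
      rw [show ((PySem.Int.mod col dc == 0) : Bool) = true by
        simp [PySem.Int.mod_eq_zero_iff_dvd, hdcol]]
      simp [hdrow, hdc.1]
    · rw [if_neg hdg]
      by_cases hdcol : dc ∣ col
      · rw [show ((PySem.Int.mod col dc == 0) : Bool) = true by
          simp [PySem.Int.mod_eq_zero_iff_dvd, hdcol]]
        simp only [if_true]
        rw [if_neg (fun hand => hdg (hgmax dc hand.1 hdcol))]
      · rw [show ((PySem.Int.mod col dc == 0) : Bool) = false by
          simp [PySem.Int.mod_eq_zero_iff_dvd, hdcol]]
        simp
  rw [hmap]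
  rw [PySem.List.pyRange_one_append 1 (g + 1) (col + 1) (by omega) (by omega)]
  rw [List.map_append, List.sum_append]
  have hzero : ((PySem.List.pyRange (g + 1) (col + 1) 1).map
      (fun dc => if dc ∣ g then (1 : Int) else 0)).sum = 0 := by
    apply List.sum_eq_zero
    intro x hx
    simp only [List.mem_map] at hx
    obtain ⟨dc, hdc, hxe⟩ := hx
    rw [PySem.List.mem_pyRange_one] at hdc
    rw [← hxe, if_neg (fun hdg => by have := Int.le_of_dvd (by omega) hdg; omega)]
  rw [hzero, add_zero]
  congr 1
  apply List.map_congr_left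
  intro d hd
  rw [show ((PySem.Int.mod g d == 0) : Bool) = decide (d ∣ g) by
    rw [Bool.eq_iff_iff]; simp [PySem.Int.mod_eq_zero_iff_dvd]]
  simp

theorem sum_pyRange (k : Nat) :
    2 * ((PySem.List.pyRange 1 ((k : Int) + 1) 1).sum) = (k : Int) * ((k : Int) + 1) ∧
      0 ≤ (PySem.List.pyRange 1 ((k : Int) + 1) 1).sum := by
  induction k with
  | zero => simp [PySem.List.pyRange_one_eq_nil (le_refl (1 : Int))]
  | succ k ih =>
    have hcast : (((k + 1 : Nat)) : Int) + 1 = ((k : Int) + 1) + 1 := by push_cast; ring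
    rw [hcast, PySem.List.pyRange_one_succ_right (by omega : (1 : Int) ≤ (k : Int) + 1)]
    rw [List.sum_append]
    simp only [List.sum_cons, List.sum_nil, add_zero]
    push_cast
    constructor
    · linear_combination ih.1
    · have h2 := ih.2
      have h3 : (0 : Int) ≤ (k : Int) := by positivity
      linarith

theorem rowLoop_inv (row cols : Int) :
    ∀ (k : Nat), (k : Int) ≤ cols →
      (∀ j : Nat, j < k → (PySem.List.pyRange 1 ((j : Int) + 1) 1).sum ≠ cols + 1) →
      (((PySem.List.pyRange 1 ((k : Int) + 1) 1).foldl
        (fun (st : List Int × Int) col =>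
          let st := if st.2 == cols + 1 then (([] : List Int), (0 : Int)) else st
          let q := (PySem.List.pyRange 1 (col + 1) 1).foldl
            (fun (cc : Int × Int) dc =>
              (if PySem.Int.mod col dc == 0
                 then (pvDivList row).foldl (fun c e => if e == dc then c + 1 else c) cc.1
                 else cc.1,
               cc.2 + 1)) ((0 : Int), st.2)
          (st.1 ++ [q.1], q.2)) (([] : List Int), (0 : Int)))
        = ((PySem.List.pyRange 1 ((k : Int) + 1) 1).map (fun col => pvColVal row col),
           (PySem.List.pyRange 1 ((k : Int) + 1) 1).sum)) := by
  intro k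
  induction k with
  | zero =>
    intro _ _
    simp [PySem.List.pyRange_one_eq_nil (le_refl (1 : Int))]
  | succ k ih =>
    intro hk hsafe
    have hkc : ((k + 1 : Nat) : Int) = (k : Int) + 1 := by push_cast; ring
    rw [hkc] at hk ⊢
    rw [PySem.List.pyRange_one_succ_right (by omega : (1 : Int) ≤ (k : Int) + 1)]
    rw [List.foldl_append, List.map_append, List.sum_append]
    rw [ih (by omega) (fun j hj => hsafe j (by omega))]
    obtain ⟨hs2, hs0⟩ := sum_pyRange k
    set s := (PySem.List.pyRange 1 ((k : Int) + 1) 1).sum with hsdef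
    -- the control check does not fire at this step
    have hne : s ≠ cols + 1 := hsafe k (by omega)
    simp only [List.foldl_cons, List.foldl_nil]
    show (let st := if (s == cols + 1) then (([] : List Int), (0 : Int))
            else ((PySem.List.pyRange 1 ((k : Int) + 1) 1).map (fun col => pvColVal row col), s);
          let q := (PySem.List.pyRange 1 (((k : Int) + 1) + 1) 1).foldl
            (fun (cc : Int × Int) dc =>
              (if PySem.Int.mod ((k : Int) + 1) dc == 0
                 then (pvDivList row).foldl (fun c e => if e == dc then c + 1 else c) cc.1
                 else cc.1,
               cc.2 + 1)) ((0 : Int), st.2)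
          (st.1 ++ [q.1], q.2)) = _
    rw [show ((s == cols + 1) : Bool) = false by simp [hne]]
    simp only [if_false, Bool.false_eq_true]
    simp only [List.map_cons, List.map_nil, List.sum_cons, List.sum_nil, add_zero]
    rw [foldl_pair_inner (PySem.List.pyRange 1 (((k : Int) + 1) + 1) 1)
      (fun c dc => if PySem.Int.mod ((k : Int) + 1) dc == 0
         then (pvDivList row).foldl (fun c e => if e == dc then c + 1 else c) c
         else c) 0 s]
    refine Prod.ext ?_ ?_
    · show _ ++ [(PySem.List.pyRange 1 (((k : Int) + 1) + 1) 1).foldl _ 0] = _ ++ [pvColVal row ((k : Int) + 1)]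
      rfl
    · show s + ((PySem.List.pyRange 1 (((k : Int) + 1) + 1) 1).length : Int) = s + ((k : Int) + 1)
      rw [PySem.List.length_pyRange_one]
      congr 1
      omega

-- each loop iteration appends exactly one element after an optional reset, so the
-- produced list can grow by at most one per column
theorem foldl_len_le (cols2 : Int) (F : Int → Int → Int → Int) :
    ∀ (l : List Int) (st : List Int × Int),
      ((l.foldl (fun (st : List Int × Int) col =>
        let st := if st.2 == cols2 + 1 then (([] : List Int), (0 : Int)) else st
        let q := (PySem.List.pyRange 1 (col + 1) 1).foldl
          (fun (cc : Int × Int) dc => (F col cc.1 dc, cc.2 + 1)) ((0 : Int), st.2)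
        (st.1 ++ [q.1], q.2)) st).1).length ≤ st.1.length + l.length := by
  intro l
  induction l with
  | nil => intro st; simp
  | cons x t ih =>
    intro st
    rw [List.foldl_cons]
    refine le_trans (ih _) ?_
    have hstep : ((if st.2 == cols2 + 1 then (([] : List Int), (0 : Int)) else st).1).length
        ≤ st.1.length := by split <;> simp
    simp only [List.length_append, List.length_cons, List.length_nil]
    omega

theorem common_divisors_spec : Claim_unchanged_common_divisors := by
  intro rows cols _hdom
  unfold Spec_common_divisors
  intro hnd
  unfold common_divisors common_divisors_alt
  by_cases hrows : rows ≤ 0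
  · rw [PySem.List.pyRange_one_eq_nil (by omega : rows + 1 ≤ 1)]
    simp
  · have hr1 : 1 ≤ rows := by omega
    have hnd' : ∀ c ∈ PySem.List.pyRange 3 (cols + 1) 1, c * (c + 1) ≠ 2 * (cols + 1) := by
      intro c hc heq
      rw [PySem.List.mem_pyRange_one] at hc
      have hcb : cols ≤ 2147483648 := by
        have h := _hdom
        unfold Dom_common_divisors pvDomInt at h
        simp only [Bool.and_eq_true, decide_eq_true_eq] at h
        exact h.2.2
      exact hnd ((D_iff rows cols hcb).mpr ⟨hr1, c, hc.1, hc.2, heq⟩)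
    rw [PySem.List.foldl_append_singleton_eq_map]
    rw [List.nil_append]
    apply List.map_congr_left
    intro row hrow
    rw [PySem.List.mem_pyRange_one] at hrow
    have hr : 1 ≤ row := hrow.1
    rw [lstRow_eq row hr]
    by_cases hcols : cols ≤ 0
    · rw [PySem.List.pyRange_one_eq_nil (by omega : cols + 1 ≤ 1)]
      simp
    · have hc1 : 1 ≤ cols := by omega
      have hc0 : cols = ((cols.toNat : Int)) := (Int.toNat_of_nonneg (by omega)).symm
      rw [hc0] at hnd' ⊢
      have hsafe : ∀ j : Nat, j < cols.toNat →
          (PySem.List.pyRange 1 ((j : Int) + 1) 1).sum ≠ (cols.toNat : Int) + 1 := by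
        intro j hj hEq
        obtain ⟨hs2, _⟩ := sum_pyRange j
        have hkk : (j : Int) * ((j : Int) + 1) = 2 * ((cols.toNat : Int) + 1) := by
          rw [← hs2, hEq]
        have hj3 : (3 : Int) ≤ (j : Int) ∨ (j : Int) ≤ 2 := by omega
        rcases hj3 with hj3 | hj3
        · exact hnd' (j : Int) (PySem.List.mem_pyRange_one.mpr ⟨hj3, by omega⟩) hkk
        · have : j = 0 ∨ j = 1 ∨ j = 2 := by omega
          rcases this with h | h | h <;> subst h <;> simp at hkk <;> omega
      rw [rowLoop_inv row ((cols.toNat : Int)) cols.toNat (le_refl _) hsafe]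
      apply List.map_congr_left
      intro col hcol
      rw [PySem.List.mem_pyRange_one] at hcol
      have hcge : 1 ≤ col := hcol.1
      rw [colVal_eq_tau row col hr hcge]
      obtain ⟨hg0, hgr, hgc, _⟩ := pyGcd_spec row col (by omega) (by omega)
      set g := pyGcd row col with hgdef
      have hg1 : 1 ≤ g := by
        have hne : g ≠ 0 := by intro h0; rw [h0, Int.zero_dvd] at hgc; omega
        omega
      have hgrow : g ≤ row := Int.le_of_dvd (by omega) hgr
      have hgcol : g ≤ col := Int.le_of_dvd (by omega) hgc
      have hbound : g < (if rows ≤ (cols.toNat : Int) then rows else (cols.toNat : Int)) + 1 := by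
        split <;> omega
      rw [PySem.List.pyGetD_map_pyRange_of_nonneg _ _ _ _ (by omega) hbound]
      rfl

theorem common_divisors_changed : Claim_changed_common_divisors := by
  unfold Claim_changed_common_divisors
  refine ⟨by decide, ?_, by decide, ?_, by decide⟩
  · show D_common_divisors 1 5
    rw [D_iff 1 5 (by norm_num)]
    exact ⟨by norm_num, 3, by norm_num, by norm_num, by norm_num⟩
  show common_divisors_alt 1 5 = [[1, 1, 1, 1, 1]]
  have hg : ∀ c : Int, 1 ≤ c → pyGcd 1 c = 1 := by
    intro c hc
    obtain ⟨hg0, hgr, _, _⟩ := pyGcd_spec 1 c (by omega) (by omega)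
    exact Int.eq_one_of_dvd_one hg0 hgr
  simp only [common_divisors_alt]
  rw [show PySem.List.pyRange 1 (5 + 1) 1 = [1, 2, 3, 4, 5] from by decide]
  rw [show PySem.List.pyRange 1 (1 + 1) 1 = [1] from by decide]
  simp only [List.map_cons, List.map_nil]
  rw [hg 1 (by norm_num), hg 2 (by norm_num), hg 3 (by norm_num),
      hg 4 (by norm_num), hg 5 (by norm_num)]
  decide

theorem common_divisors_tight : Claim_exact_common_divisors := by
  intro rows cols hdom hD
  have hcb : cols ≤ 2147483648 := by
    unfold Dom_common_divisors pvDomInt at hdom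
    simp only [Bool.and_eq_true, decide_eq_true_eq] at hdom
    exact hdom.2.2
  rw [D_iff rows cols hcb] at hD
  obtain ⟨hr1, c, hc3, hclt, hceq⟩ := hD
  have hccols : c < cols := by nlinarith
  intro hEqAB
  unfold common_divisors common_divisors_alt at hEqAB
  rw [PySem.List.foldl_append_singleton_eq_map, List.nil_append] at hEqAB
  rw [PySem.List.pyRange_one_cons (show (1 : Int) < rows + 1 by omega)] at hEqAB
  simp only [List.map_cons, List.cons.injEq] at hEqAB
  have hhead := hEqAB.1
  rw [lstRow_eq 1 (le_refl 1)] at hhead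
  -- phase 1: no reset before column c+1
  have hcn : ((c.toNat : Nat) : Int) = c := Int.toNat_of_nonneg (by omega)
  have hsafe : ∀ j : Nat, j < c.toNat →
      (PySem.List.pyRange 1 ((j : Int) + 1) 1).sum ≠ cols + 1 := by
    intro j hj hEq
    obtain ⟨hs2, _⟩ := sum_pyRange j
    rw [hEq] at hs2
    have hjc : (j : Int) < c := by omega
    nlinarith
  have hstep1 := rowLoop_inv 1 cols c.toNat (by omega) hsafe
  rw [hcn] at hstep1
  have hsum : (PySem.List.pyRange 1 (c + 1) 1).sum = cols + 1 := by
    obtain ⟨hs2, _⟩ := sum_pyRange c.toNat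
    rw [hcn] at hs2
    omega
  -- split A's column loop at the reset point c + 1
  rw [PySem.List.pyRange_one_append 1 (c + 1) (cols + 1) (by omega) (by omega),
      List.foldl_append, hstep1,
      PySem.List.pyRange_one_cons (show c + 1 < cols + 1 by omega),
      List.foldl_cons] at hhead
  rw [show (((((PySem.List.pyRange 1 (c + 1) 1).map (fun col => pvColVal 1 col),
        (PySem.List.pyRange 1 (c + 1) 1).sum) : List Int × Int).2 == cols + 1) : Bool) = true by
      simp [hsum]] at hhead
  have hlenA := congrArg List.length hhead
  rw [List.length_map, List.length_append, List.length_cons,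
      PySem.List.length_pyRange_one, PySem.List.length_pyRange_one] at hlenA
  have hbound := foldl_len_le cols
    (fun col c1 dc => if PySem.Int.mod col dc == 0
       then (pvDivList 1).foldl (fun c2 e => if e == dc then c2 + 1 else c2) c1
       else c1)
    (PySem.List.pyRange (c + 1 + 1) (cols + 1) 1)
    ((if true then (([] : List Int), (0 : Int))
      else ((PySem.List.pyRange 1 (c + 1) 1).map (fun col => pvColVal 1 col),
        (PySem.List.pyRange 1 (c + 1) 1).sum)).1 ++
      [((PySem.List.pyRange 1 (c + 1 + 1) 1).foldl
        (fun (cc : Int × Int) dc =>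
          (if PySem.Int.mod (c + 1) dc == 0
             then (pvDivList 1).foldl (fun c2 e => if e == dc then c2 + 1 else c2) cc.1
             else cc.1,
           cc.2 + 1))
        ((0 : Int), (if true then (([] : List Int), (0 : Int))
          else ((PySem.List.pyRange 1 (c + 1) 1).map (fun col => pvColVal 1 col),
            (PySem.List.pyRange 1 (c + 1) 1).sum)).2)).1],
     ((PySem.List.pyRange 1 (c + 1 + 1) 1).foldl
        (fun (cc : Int × Int) dc =>
          (if PySem.Int.mod (c + 1) dc == 0
             then (pvDivList 1).foldl (fun c2 e => if e == dc then c2 + 1 else c2) cc.1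
             else cc.1,
           cc.2 + 1))
        ((0 : Int), (if true then (([] : List Int), (0 : Int))
          else ((PySem.List.pyRange 1 (c + 1) 1).map (fun col => pvColVal 1 col),
            (PySem.List.pyRange 1 (c + 1) 1).sum)).2)).2)
  rw [hlenA] at hbound
  simp only [if_true, List.nil_append, List.length_cons, List.length_nil] at hbound
  rw [PySem.List.length_pyRange_one] at hbound
  omega
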